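-- pv_equiv track=rewrite | github.com/DilnaDilin/IMProject | MCIMbase/pythonProject/adjust.py | adjust_seed_set
-- ===== SOURCE A (Python) =====
-- def adjust_seed_set(seed_set, budget, costs):
--     # Sort the seed set based on individual node cost in ascending order (least expensive first)
--     seed_set = sorted(seed_set, key=lambda node: costs[node])
--
--     # Calculate the total cost of the seed set
--     total_cost = sum([costs[node] for node in seed_set])
--
--     # Initialize an empty list to store nodes that fit within the budget
--     final_seed_set = []
--     tot_removed = []
--
--     # While the total cost exceeds the budget
--     while total_cost > budget and seed_set:
--         # Remove the node with the least cost
--         removed_node = seed_set.pop(0)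
--         tot_removed.append(removed_node)
--         total_cost -= costs[removed_node]
--     tot_removed = sorted(tot_removed, key=lambda node: costs[node])
--     final_seed_set = seed_set
--     # Add the removed nodes back if the budget allows, starting with the least expensive
--     for node in tot_removed:
--         if (total_cost + costs[node]) <= budget:
--             final_seed_set.append(node)
--             total_cost += costs[node]
--
--     return final_seed_set, total_cost
-- ===== SOURCE B (Python) =====
-- def adjust_seed_set(seed_set, budget, costs):
--     # Sort ascending by cost (stable), then find the removal count k directly
--     # via prefix sums instead of popping one node at a time.
--     ss = sorted(seed_set, key=lambda node: costs[node])
--     n = len(ss)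
--     prefix = [0]
--     for node in ss:
--         prefix.append(prefix[-1] + costs[node])
--     total = prefix[n]
--     # smallest k with total - prefix[k] <= budget; if none, remove everything
--     k = n
--     for i in range(n + 1):
--         if total - prefix[i] <= budget:
--             k = i
--             break
--     kept = ss[k:]
--     cur = total - prefix[k]
--     out = list(kept)
--     # re-add the cheapest removed nodes while they still fit
--     for node in ss[:k]:
--         if cur + costs[node] <= budget:
--             out.append(node)
--             cur += costs[node]
--     return out, cur
-- ===== Notes on version B (the rewrite author's own statement) =====
-- stated objective: faster
-- what changed: Replaces the pop(0)-one-at-a-time while loop (each pop shifts the whole list) by a prefix-sum array over the cost-sorted list from which the removal count k is read off directly as the first k with total - prefix[k] <= budget; the kept suffix, leftover budget and the unchanged cheapest-first re-add scan follow from k by slicing.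
import Mathlib
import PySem

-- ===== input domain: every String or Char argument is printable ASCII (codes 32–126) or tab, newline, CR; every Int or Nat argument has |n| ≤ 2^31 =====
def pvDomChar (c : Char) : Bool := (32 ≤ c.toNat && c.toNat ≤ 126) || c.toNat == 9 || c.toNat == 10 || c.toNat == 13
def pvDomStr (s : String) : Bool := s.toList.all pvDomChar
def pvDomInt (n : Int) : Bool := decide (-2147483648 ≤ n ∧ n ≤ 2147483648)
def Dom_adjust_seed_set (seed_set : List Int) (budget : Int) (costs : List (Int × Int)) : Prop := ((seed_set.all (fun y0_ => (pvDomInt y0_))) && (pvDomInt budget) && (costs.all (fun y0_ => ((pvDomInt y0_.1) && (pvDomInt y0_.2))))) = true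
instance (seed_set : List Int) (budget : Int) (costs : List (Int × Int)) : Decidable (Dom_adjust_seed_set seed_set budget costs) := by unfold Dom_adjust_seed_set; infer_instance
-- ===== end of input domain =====

-- B replaces A's pop(0)-one-at-a-time trimming loop by a prefix-sum array from which the
-- removal count is read off directly (objective: faster; A's list.pop(0) shifts the list each time).


-- ===== PORT A =====
-- the while loop: pop the front node while total_cost > budget and the list is nonempty
def pvPopLoop (c : Int → Int) (budget : Int) : List Int → Int → List Int → List Int × Int × List Int
  | [], t, rem => ([], t, rem)
  | x :: s, t, rem =>
      if budget < t then pvPopLoop c budget s (t - c x) (rem ++ [x]) else (x :: s, t, rem)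

def adjust_seed_set (seed_set : List Int) (budget : Int) (costs : List (Int × Int)) : List Int × Int :=
  -- costs[node]; KeyError (node not a key) is excluded by Pre_
  let c : Int → Int := fun n => (PySem.Dict.ofList costs).getD n 0
  let ss := PySem.List.sorted seed_set c
  let total := (ss.map c).sum
  let r := pvPopLoop c budget ss total []
  let tot_removed := PySem.List.sorted r.2.2 c
  tot_removed.foldl
    (fun acc node => if acc.2 + c node ≤ budget then (acc.1 ++ [node], acc.2 + c node) else acc)
    (r.1, r.2.1)

-- ===== PORT B =====
-- the prefix-building for loop: prefix.append(prefix[-1] + costs[node]), carrying prefix[-1]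
def pvPrefixGo (c : Int → Int) : List Int → Int → List Int
  | [], _ => []
  | x :: s, last => (last + c x) :: pvPrefixGo c s (last + c x)

def adjust_seed_set_alt (seed_set : List Int) (budget : Int) (costs : List (Int × Int)) : List Int × Int :=
  let c : Int → Int := fun n => (PySem.Dict.ofList costs).getD n 0
  let ss := PySem.List.sorted seed_set c
  let n := ss.length
  let pre := 0 :: pvPrefixGo c ss 0
  -- prefix[i] with 0 ≤ i ≤ n = len(prefix)-1: always in range, List.getD is exact here
  let total := pre.getD n 0
  -- k = n; for i in range(n+1): if …: k = i; break  ⇒ first hit, default n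
  let k := ((List.range (n + 1)).find? (fun i => decide (total - pre.getD i 0 ≤ budget))).getD n
  -- ss[k:] / ss[:k] with 0 ≤ k ≤ n: Python slicing = drop / take here
  let kept := ss.drop k
  let cur := total - pre.getD k 0
  (ss.take k).foldl
    (fun acc node => if acc.2 + c node ≤ budget then (acc.1 ++ [node], acc.2 + c node) else acc)
    (kept, cur)

-- ===== PRECONDITION & SPEC =====
-- Pre_: every seed node must be a key of costs, otherwise A raises KeyError in the sort key.
def Pre_adjust_seed_set (seed_set : List Int) (budget : Int) (costs : List (Int × Int)) : Prop :=
  seed_set.all (fun n => (PySem.Dict.ofList costs).contains n) = true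
instance (seed_set : List Int) (budget : Int) (costs : List (Int × Int)) : Decidable (Pre_adjust_seed_set seed_set budget costs) := by unfold Pre_adjust_seed_set; infer_instance
def pvWitness_adjust_seed_set : List Int × Int × (List (Int × Int)) := ([1, 2, 3], 5, [(1, 3), (2, 4), (3, 1)])

def Spec_adjust_seed_set (seed_set : List Int) (budget : Int) (costs : List (Int × Int)) (out : List Int × Int) : Prop := out = adjust_seed_set_alt seed_set budget costs
instance (seed_set : List Int) (budget : Int) (costs : List (Int × Int)) (out : List Int × Int) : Decidable (Spec_adjust_seed_set seed_set budget costs out) := by unfold Spec_adjust_seed_set; infer_instance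

-- ===== CLAIM (what is proved, stated in full; the proofs are below) =====
def Claim_equal_adjust_seed_set : Prop := ∀ (seed_set : List Int) (budget : Int) (costs : List (Int × Int)), Dom_adjust_seed_set seed_set budget costs → Pre_adjust_seed_set seed_set budget costs → Spec_adjust_seed_set seed_set budget costs (adjust_seed_set seed_set budget costs)

-- ===== LEMMAS AND PROOFS =====

-- partial sum of the first i costs
def pvPS (c : Int → Int) (s : List Int) (i : Nat) : Int := ((s.take i).map c).sum

-- the number of nodes A's while loop removes
def pvK (c : Int → Int) (budget : Int) : List Int → Int → Nat
  | [], _ => 0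
  | x :: s, t => if budget < t then pvK c budget s (t - c x) + 1 else 0

theorem pvPS_cons_succ (c : Int → Int) (x : Int) (s : List Int) (i : Nat) :
    pvPS c (x :: s) (i + 1) = c x + pvPS c s i := by
  simp [pvPS]

theorem pvPS_length (c : Int → Int) (s : List Int) : pvPS c s s.length = (s.map c).sum := by
  simp [pvPS]

theorem pvK_le (c : Int → Int) (budget : Int) :
    ∀ (s : List Int) (t : Int), pvK c budget s t ≤ s.length := by
  intro s
  induction s with
  | nil => intro t; simp [pvK]
  | cons x s ih =>
      intro t
      simp only [pvK, List.length_cons]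
      split
      · exact Nat.succ_le_succ (ih _)
      · exact Nat.zero_le _

theorem pvPopLoop_eq (c : Int → Int) (budget : Int) :
    ∀ (s : List Int) (t : Int) (rem : List Int),
      pvPopLoop c budget s t rem =
        (s.drop (pvK c budget s t), t - pvPS c s (pvK c budget s t),
          rem ++ s.take (pvK c budget s t)) := by
  intro s
  induction s with
  | nil => intro t rem; simp [pvPopLoop, pvK, pvPS]
  | cons x s ih =>
      intro t rem
      simp only [pvPopLoop, pvK]
      split
      · rw [ih]
        simp [pvPS_cons_succ]
        ring_nf
      · simp [pvPS]

theorem pvPrefixGo_getD (c : Int → Int) :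
    ∀ (s : List Int) (a : Int) (i : Nat), i ≤ s.length →
      (a :: pvPrefixGo c s a).getD i 0 = a + pvPS c s i := by
  intro s
  induction s with
  | nil =>
      intro a i hi
      have h0 : i = 0 := Nat.le_zero.mp hi
      subst h0
      simp [pvPS]
  | cons x s ih =>
      intro a i hi
      cases i with
      | zero => simp [pvPS]
      | succ j =>
          have hj : j ≤ s.length := by simpa using hi
          have := ih (a + c x) j hj
          simp only [pvPrefixGo, List.getD_cons_succ] at this ⊢
          rw [this, pvPS_cons_succ]
          ring

theorem pvFind_eq_pvK (c : Int → Int) (budget : Int) :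
    ∀ (s : List Int) (t : Int),
      (((List.range (s.length + 1)).find? (fun i => decide (t - pvPS c s i ≤ budget))).getD s.length)
        = pvK c budget s t := by
  intro s
  induction s with
  | nil =>
      intro t
      by_cases h : t - pvPS c ([] : List Int) 0 ≤ budget
      · rw [show List.range (List.length ([] : List Int) + 1) = [0] from rfl,
          List.find?_cons_of_pos (by simpa using h)]
        rfl
      · rw [show List.range (List.length ([] : List Int) + 1) = [0] from rfl,
          List.find?_cons_of_neg (by simpa using h)]
        rfl
  | cons x s ih =>
      intro t
      have hps0 : pvPS c (x :: s) 0 = 0 := rfl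
      by_cases ht : budget < t
      · have h0 : (decide (t - pvPS c (x :: s) 0 ≤ budget)) = false := by
          simp [hps0]; omega
        rw [List.length_cons, List.range_succ_eq_map]
        simp only [List.find?_cons, h0]
        rw [List.find?_map]
        have hcomp : ((fun i => decide (t - pvPS c (x :: s) i ≤ budget)) ∘ Nat.succ)
            = fun i => decide ((t - c x) - pvPS c s i ≤ budget) := by
          funext i
          show decide (t - pvPS c (x :: s) (i + 1) ≤ budget) = _
          rw [pvPS_cons_succ]
          by_cases hb : (t - c x) - pvPS c s i ≤ budget
          · have hb' : t - (c x + pvPS c s i) ≤ budget := by omega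
            simp [hb, hb']
          · have hb' : ¬ t - (c x + pvPS c s i) ≤ budget := by omega
            simp [hb, hb']
        rw [hcomp]
        have hI := ih (t - c x)
        rw [show pvK c budget (x :: s) t = pvK c budget s (t - c x) + 1 by
          simp [pvK, ht]]
        cases hf : (List.range (s.length + 1)).find? (fun i => decide ((t - c x) - pvPS c s i ≤ budget)) with
        | none =>
            rw [hf] at hI
            simp only [hf, Option.map_none, Option.getD_none] at *
            omega
        | some j =>
            rw [hf] at hI
            simp only [Option.map_some, Option.getD_some] at *
            omega
      · have h0 : (decide (t - pvPS c (x :: s) 0 ≤ budget)) = true := by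
          simp [hps0]; omega
        rw [List.length_cons, List.range_succ_eq_map]
        simp only [List.find?_cons, h0]
        simp [pvK, ht]

-- find? only looks at the predicate's values on the list's elements
theorem pvFind?_congr {α : Type} (p q : α → Bool) :
    ∀ (l : List α), (∀ a ∈ l, p a = q a) → l.find? p = l.find? q := by
  intro l
  induction l with
  | nil => intro _; rfl
  | cons a l ih =>
      intro h
      simp only [List.find?_cons, h a (by simp)]
      cases hq : q a with
      | true => rfl
      | false => exact ih (fun b hb => h b (by simp [hb]))

-- the removed prefix of a cost-sorted list is already cost-sorted, so A's re-sort is the identity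
theorem pvSorted_take (c : Int → Int) (xs : List Int) (k : Nat) :
    PySem.List.sorted ((PySem.List.sorted xs c).take k) c = (PySem.List.sorted xs c).take k := by
  apply PySem.List.sorted_eq_self_of_pairwise
  exact List.Pairwise.sublist (List.take_sublist k _) (PySem.List.sorted_pairwise xs c)

-- ===== VERDICT (by name: the statement is the Claim_ definition above) =====
theorem adjust_seed_set_spec : Claim_equal_adjust_seed_set := by
  intro seed_set budget costs _ _
  unfold Spec_adjust_seed_set
  show adjust_seed_set seed_set budget costs = adjust_seed_set_alt seed_set budget costs
  simp only [adjust_seed_set, adjust_seed_set_alt]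
  rw [pvPopLoop_eq]
  simp only [List.nil_append]
  rw [pvSorted_take]
  generalize (fun n => (PySem.Dict.ofList costs).getD n 0) = c
  generalize PySem.List.sorted seed_set c = ss
  have hpre : ∀ i : Nat, i ≤ ss.length →
      (0 :: pvPrefixGo c ss 0).getD i 0 = pvPS c ss i := by
    intro i hi
    rw [pvPrefixGo_getD c ss 0 i hi]
    ring
  rw [hpre ss.length le_rfl, pvPS_length]
  have hfind : (List.range (ss.length + 1)).find?
        (fun i => decide ((ss.map c).sum - (0 :: pvPrefixGo c ss 0).getD i 0 ≤ budget))
      = (List.range (ss.length + 1)).find?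
        (fun i => decide ((ss.map c).sum - pvPS c ss i ≤ budget)) := by
    apply pvFind?_congr
    intro i hi
    have hile : i ≤ ss.length := by
      have := List.mem_range.mp hi; omega
    rw [hpre i hile]
  rw [hfind, pvFind_eq_pvK c budget ss ((ss.map c).sum)]
  rw [hpre _ (pvK_le c budget ss ((ss.map c).sum))]
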